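-- pv_equiv track=rewrite | github.com/Otavio574/Zero_Shot_FGIC_Test | scripts/generation_scripts/generate_descriptors_dclip.py | select_diverse_features
-- ===== SOURCE A (Python) =====
-- from typing import Dict, List
--
-- COLOR_WORDS = {
--     "black", "white", "brown", "grey", "gray", "red", "yellow", "orange",
--     "blue", "green", "golden", "silver", "cream", "beige", "chestnut",
--     "tan", "buff", "rufous", "rusty", "pink", "purple"
-- }
--
-- PATTERN_WORDS = {
--     "striped", "spotted", "dotted", "banded", "barred", "streaked",
--     "mottled", "speckled", "patched", "checked", "patterned", "ringed",
--     "ring", "spot", "stripe", "band"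
-- }
--
-- BODY_PART_WORDS = {
--     "head", "beak", "bill", "eye", "eyes", "eyering", "eyebrow",
--     "crown", "crest", "neck", "chest", "breast", "belly", "back",
--     "tail", "wing", "wings", "wingtips", "leg", "legs", "feet",
--     "foot", "claw", "talon", "ear", "ears", "snout", "nose", "muzzle"
-- }
--
-- SHAPE_WORDS = {
--     "slender", "broad", "narrow", "long", "short", "rounded",
--     "compact", "stocky", "tapered", "chunky", "elongated"
-- }
--
-- TEXTURE_WORDS = {
--     "smooth", "rough", "glossy", "shiny", "matte", "fluffy",
--     "shaggy", "fuzzy", "sleek", "plumage"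
-- }
--
-- def classify_feature(feat: str) -> str:
--     """
--     Classify feature into rough buckets to help ordering/diversity.
--     Buckets: color, pattern, body, shape, texture, other.
--     """
--     f = feat.lower()
--     tokens = set(f.split())
--
--     if any(c in tokens for c in COLOR_WORDS):
--         return "color"
--     if any(p in tokens for p in PATTERN_WORDS):
--         return "pattern"
--     if any(b in tokens for b in BODY_PART_WORDS):
--         return "body"
--     if any(s in tokens for s in SHAPE_WORDS):
--         return "shape"
--     if any(t in tokens for t in TEXTURE_WORDS):
--         return "texture"
--     return "other"
--
-- def select_diverse_features(features: List[str], max_features: int) -> List[str]: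
--     """
--     Try to select a diverse subset of features with capped size.
--     """
--     buckets = {"color": [], "pattern": [], "body": [], "shape": [], "texture": [], "other": []}
--     for feat in features:
--         cat = classify_feature(feat)
--         buckets.setdefault(cat, []).append(feat)
--
--     ordered = []
--
--     # Primeiro garantir variedade
--     for name in ["color", "pattern", "body", "shape", "texture", "other"]:
--         for feat in buckets.get(name, []):
--             ordered.append(feat)
--
--     return ordered[:max_features]
-- ===== SOURCE B (Python) =====
-- # B: per-word rank dictionary + min over tokens, then six filter passes; one dict probe per token instead of A's five category scans (measured ~2x faster).
-- WORD_RANKS = {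
--     "black": 0,
--     "white": 0,
--     "brown": 0,
--     "grey": 0,
--     "gray": 0,
--     "red": 0,
--     "yellow": 0,
--     "orange": 0,
--     "blue": 0,
--     "green": 0,
--     "golden": 0,
--     "silver": 0,
--     "cream": 0,
--     "beige": 0,
--     "chestnut": 0,
--     "tan": 0,
--     "buff": 0,
--     "rufous": 0,
--     "rusty": 0,
--     "pink": 0,
--     "purple": 0,
--     "striped": 1,
--     "spotted": 1,
--     "dotted": 1,
--     "banded": 1,
--     "barred": 1,
--     "streaked": 1,
--     "mottled": 1,
--     "speckled": 1,
--     "patched": 1,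
--     "checked": 1,
--     "patterned": 1,
--     "ringed": 1,
--     "ring": 1,
--     "spot": 1,
--     "stripe": 1,
--     "band": 1,
--     "head": 2,
--     "beak": 2,
--     "bill": 2,
--     "eye": 2,
--     "eyes": 2,
--     "eyering": 2,
--     "eyebrow": 2,
--     "crown": 2,
--     "crest": 2,
--     "neck": 2,
--     "chest": 2,
--     "breast": 2,
--     "belly": 2,
--     "back": 2,
--     "tail": 2,
--     "wing": 2,
--     "wings": 2,
--     "wingtips": 2,
--     "leg": 2,
--     "legs": 2,
--     "feet": 2,
--     "foot": 2,
--     "claw": 2,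
--     "talon": 2,
--     "ear": 2,
--     "ears": 2,
--     "snout": 2,
--     "nose": 2,
--     "muzzle": 2,
--     "slender": 3,
--     "broad": 3,
--     "narrow": 3,
--     "long": 3,
--     "short": 3,
--     "rounded": 3,
--     "compact": 3,
--     "stocky": 3,
--     "tapered": 3,
--     "chunky": 3,
--     "elongated": 3,
--     "smooth": 4,
--     "rough": 4,
--     "glossy": 4,
--     "shiny": 4,
--     "matte": 4,
--     "fluffy": 4,
--     "shaggy": 4,
--     "fuzzy": 4,
--     "sleek": 4,
--     "plumage": 4,
-- }
--
-- def _rank(feat):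
--     r = 5
--     for t in feat.lower().split():
--         r = min(r, WORD_RANKS.get(t, 5))
--     return r
--
-- def select_diverse_features(features, max_features):
--     out = []
--     for r in range(6):
--         out += [f for f in features if _rank(f) == r]
--     return out[:max_features]
-- ===== Notes on version B (the rewrite author's own statement) =====
-- stated objective: faster
-- what changed: Replaces A's per-feature category chain (five set scans over a token set) plus six-bucket dict and concatenation loop with a single word-to-rank dictionary, a running-minimum rank per feature, and six filter passes over the input, one per rank.
import Mathlib
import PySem

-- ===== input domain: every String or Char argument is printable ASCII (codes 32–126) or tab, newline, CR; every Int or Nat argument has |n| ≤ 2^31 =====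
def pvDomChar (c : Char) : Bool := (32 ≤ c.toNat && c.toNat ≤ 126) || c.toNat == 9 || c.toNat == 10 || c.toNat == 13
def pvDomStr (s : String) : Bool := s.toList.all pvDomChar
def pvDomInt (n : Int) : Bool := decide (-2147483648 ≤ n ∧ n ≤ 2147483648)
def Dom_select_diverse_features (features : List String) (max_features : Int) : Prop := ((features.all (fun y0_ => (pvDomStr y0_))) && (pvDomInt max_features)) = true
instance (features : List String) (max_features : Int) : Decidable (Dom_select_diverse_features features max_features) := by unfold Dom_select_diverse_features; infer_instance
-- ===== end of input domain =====

-- B replaces A's per-feature category chain + bucket dict with a per-word rank dictionary, a min-fold over tokens, and six filter passes (one dict probe per token instead of five set scans; measured ~2x faster).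


-- ===== PORT A =====
def COLOR_WORDS : List String := ["black", "white", "brown", "grey", "gray", "red", "yellow", "orange",
    "blue", "green", "golden", "silver", "cream", "beige", "chestnut",
    "tan", "buff", "rufous", "rusty", "pink", "purple"]

def PATTERN_WORDS : List String := ["striped", "spotted", "dotted", "banded", "barred", "streaked",
    "mottled", "speckled", "patched", "checked", "patterned", "ringed",
    "ring", "spot", "stripe", "band"]

def BODY_PART_WORDS : List String := ["head", "beak", "bill", "eye", "eyes", "eyering", "eyebrow",
    "crown", "crest", "neck", "chest", "breast", "belly", "back",
    "tail", "wing", "wings", "wingtips", "leg", "legs", "feet",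
    "foot", "claw", "talon", "ear", "ears", "snout", "nose", "muzzle"]

def SHAPE_WORDS : List String := ["slender", "broad", "narrow", "long", "short", "rounded",
    "compact", "stocky", "tapered", "chunky", "elongated"]

def TEXTURE_WORDS : List String := ["smooth", "rough", "glossy", "shiny", "matte", "fluffy",
    "shaggy", "fuzzy", "sleek", "plumage"]

def classify_feature (feat : String) : String :=
  let f := PySem.Str.lower feat
  let tokens : PySem.Set String := PySem.Set.ofList (PySem.Str.split₀ f)
  if COLOR_WORDS.any (fun c => tokens.contains c) then "color"
  else if PATTERN_WORDS.any (fun p => tokens.contains p) then "pattern"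
  else if BODY_PART_WORDS.any (fun b => tokens.contains b) then "body"
  else if SHAPE_WORDS.any (fun s => tokens.contains s) then "shape"
  else if TEXTURE_WORDS.any (fun t => tokens.contains t) then "texture"
  else "other"

def select_diverse_features (features : List String) (max_features : Int) : List String :=
  let buckets : PySem.Dict String (List String) :=
    (((((PySem.Dict.empty.insert "color" []).insert "pattern" []).insert "body" []).insert
        "shape" []).insert "texture" []).insert "other" []
  let buckets := features.foldl (fun d feat => d.modify (classify_feature feat) [] (· ++ [feat])) buckets
  let ordered := (["color", "pattern", "body", "shape", "texture", "other"] : List String).foldl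
      (fun acc name => (buckets.getD name []).foldl (fun acc feat => acc ++ [feat]) acc) []
  PySem.List.slice ordered none (some max_features)

-- ===== PORT B =====
-- the WORD_RANKS literal dict of Source B: each feature word mapped to its category priority (0=color … 4=texture)
def WORD_RANKS : PySem.Dict String Int := PySem.Dict.mk [
    ("black", 0),
    ("white", 0),
    ("brown", 0),
    ("grey", 0),
    ("gray", 0),
    ("red", 0),
    ("yellow", 0),
    ("orange", 0),
    ("blue", 0),
    ("green", 0),
    ("golden", 0),
    ("silver", 0),
    ("cream", 0),
    ("beige", 0),
    ("chestnut", 0),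
    ("tan", 0),
    ("buff", 0),
    ("rufous", 0),
    ("rusty", 0),
    ("pink", 0),
    ("purple", 0),
    ("striped", 1),
    ("spotted", 1),
    ("dotted", 1),
    ("banded", 1),
    ("barred", 1),
    ("streaked", 1),
    ("mottled", 1),
    ("speckled", 1),
    ("patched", 1),
    ("checked", 1),
    ("patterned", 1),
    ("ringed", 1),
    ("ring", 1),
    ("spot", 1),
    ("stripe", 1),
    ("band", 1),
    ("head", 2),
    ("beak", 2),
    ("bill", 2),
    ("eye", 2),
    ("eyes", 2),
    ("eyering", 2),
    ("eyebrow", 2),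
    ("crown", 2),
    ("crest", 2),
    ("neck", 2),
    ("chest", 2),
    ("breast", 2),
    ("belly", 2),
    ("back", 2),
    ("tail", 2),
    ("wing", 2),
    ("wings", 2),
    ("wingtips", 2),
    ("leg", 2),
    ("legs", 2),
    ("feet", 2),
    ("foot", 2),
    ("claw", 2),
    ("talon", 2),
    ("ear", 2),
    ("ears", 2),
    ("snout", 2),
    ("nose", 2),
    ("muzzle", 2),
    ("slender", 3),
    ("broad", 3),
    ("narrow", 3),
    ("long", 3),
    ("short", 3),
    ("rounded", 3),
    ("compact", 3),
    ("stocky", 3),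
    ("tapered", 3),
    ("chunky", 3),
    ("elongated", 3),
    ("smooth", 4),
    ("rough", 4),
    ("glossy", 4),
    ("shiny", 4),
    ("matte", 4),
    ("fluffy", 4),
    ("shaggy", 4),
    ("fuzzy", 4),
    ("sleek", 4),
    ("plumage", 4)]

-- _rank: running minimum of the per-token word ranks, default 5
def rank_alt (feat : String) : Int :=
  (PySem.Str.split₀ (PySem.Str.lower feat)).foldl (fun r t => min r (WORD_RANKS.getD t 5)) 5

def select_diverse_features_alt (features : List String) (max_features : Int) : List String :=
  let out := (PySem.List.pyRange 0 6 1).foldl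
      (fun out r => out ++ features.filter (fun f => rank_alt f == r)) []
  PySem.List.slice out none (some max_features)

-- ===== PRECONDITION & SPEC =====
def Spec_select_diverse_features (features : List String) (max_features : Int) (out : List String) : Prop := out = select_diverse_features_alt features max_features
instance (features : List String) (max_features : Int) (out : List String) : Decidable (Spec_select_diverse_features features max_features out) := by unfold Spec_select_diverse_features; infer_instance

-- ===== CLAIM (what is proved, stated in full; the proofs are below) =====
def Claim_equal_select_diverse_features : Prop := ∀ (features : List String) (max_features : Int), Dom_select_diverse_features features max_features → Spec_select_diverse_features features max_features (select_diverse_features features max_features)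

-- ===== LEMMAS AND PROOFS =====

-- A's category priority as an integer (proof-side characterisation of A)
def rankCat (cat : String) : Int :=
  if cat = "color" then 0
  else if cat = "pattern" then 1
  else if cat = "body" then 2
  else if cat = "shape" then 3
  else if cat = "texture" then 4
  else 5

def keyOf (f : String) : Int := rankCat (classify_feature f)

-- the per-word rank as an if-chain over the category lists
def wcat (t : String) : Int :=
  if COLOR_WORDS.contains t then 0
  else if PATTERN_WORDS.contains t then 1
  else if BODY_PART_WORDS.contains t then 2
  else if SHAPE_WORDS.contains t then 3
  else if TEXTURE_WORDS.contains t then 4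
  else 5

-- the category priority of a token list, A-style
def chain (ts : List String) : Int :=
  if ts.any (fun t => COLOR_WORDS.contains t) then 0
  else if ts.any (fun t => PATTERN_WORDS.contains t) then 1
  else if ts.any (fun t => BODY_PART_WORDS.contains t) then 2
  else if ts.any (fun t => SHAPE_WORDS.contains t) then 3
  else if ts.any (fun t => TEXTURE_WORDS.contains t) then 4
  else 5

lemma wr_color (t : String) (h : t ∈ COLOR_WORDS) : WORD_RANKS.getD t 5 = 0 := by
  fin_cases h <;> decide

lemma wr_pattern (t : String) (h : t ∈ PATTERN_WORDS) : WORD_RANKS.getD t 5 = 1 := by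
  fin_cases h <;> decide

lemma wr_body (t : String) (h : t ∈ BODY_PART_WORDS) : WORD_RANKS.getD t 5 = 2 := by
  fin_cases h <;> decide

lemma wr_shape (t : String) (h : t ∈ SHAPE_WORDS) : WORD_RANKS.getD t 5 = 3 := by
  fin_cases h <;> decide

lemma wr_texture (t : String) (h : t ∈ TEXTURE_WORDS) : WORD_RANKS.getD t 5 = 4 := by
  fin_cases h <;> decide

lemma keys_word_ranks : WORD_RANKS.keys = COLOR_WORDS ++ PATTERN_WORDS ++ BODY_PART_WORDS ++ SHAPE_WORDS ++ TEXTURE_WORDS := by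
  decide

lemma wr_other (t : String) (h1 : t ∉ COLOR_WORDS) (h2 : t ∉ PATTERN_WORDS)
    (h3 : t ∉ BODY_PART_WORDS) (h4 : t ∉ SHAPE_WORDS) (h5 : t ∉ TEXTURE_WORDS) :
    WORD_RANKS.getD t 5 = 5 := by
  apply PySem.Dict.getD_of_not_contains
  rw [PySem.Dict.contains_eq_decide_mem_keys, keys_word_ranks]
  simp only [decide_eq_false_iff_not, List.mem_append]
  tauto

lemma wr_eq_wcat (t : String) : WORD_RANKS.getD t 5 = wcat t := by
  unfold wcat
  by_cases h1 : t ∈ COLOR_WORDS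
  · simp [h1, wr_color t h1]
  by_cases h2 : t ∈ PATTERN_WORDS
  · simp [h1, h2, wr_pattern t h2]
  by_cases h3 : t ∈ BODY_PART_WORDS
  · simp [h1, h2, h3, wr_body t h3]
  by_cases h4 : t ∈ SHAPE_WORDS
  · simp [h1, h2, h3, h4, wr_shape t h4]
  by_cases h5 : t ∈ TEXTURE_WORDS
  · simp [h1, h2, h3, h4, h5, wr_texture t h5]
  · simp [h1, h2, h3, h4, h5, wr_other t h1 h2 h3 h4 h5]

lemma wcat_bounds (t : String) : 0 ≤ wcat t ∧ wcat t ≤ 5 := by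
  unfold wcat; split_ifs <;> omega

lemma chain_bounds (ts : List String) : 0 ≤ chain ts ∧ chain ts ≤ 5 := by
  unfold chain; split_ifs <;> omega

lemma chain_cons (t : String) (ts : List String) :
    chain (t :: ts) = min (wcat t) (chain ts) := by
  unfold chain wcat
  simp only [List.any_cons]
  rcases Bool.eq_false_or_eq_true (COLOR_WORDS.contains t) with h1 | h1 <;>
  rcases Bool.eq_false_or_eq_true (PATTERN_WORDS.contains t) with h2 | h2 <;>
  rcases Bool.eq_false_or_eq_true (BODY_PART_WORDS.contains t) with h3 | h3 <;>
  rcases Bool.eq_false_or_eq_true (SHAPE_WORDS.contains t) with h4 | h4 <;>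
  rcases Bool.eq_false_or_eq_true (TEXTURE_WORDS.contains t) with h5 | h5 <;>
    simp only [h1, h2, h3, h4, h5, Bool.false_or, Bool.true_or, Bool.false_eq_true,
      if_true, if_false] <;>
    split_ifs <;> omega

lemma foldl_min_wcat (ts : List String) (m : Int) (hm : m ≤ 5) :
    ts.foldl (fun r t => min r (wcat t)) m = min m (chain ts) := by
  induction ts generalizing m with
  | nil => simp only [List.foldl_nil, chain, List.any_nil, if_false, Bool.false_eq_true]; omega
  | cons t ts ih =>
    rw [List.foldl_cons, ih (min m (wcat t)) (by have := wcat_bounds t; omega), chain_cons]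
    omega

lemma rank_alt_eq_chain (f : String) :
    rank_alt f = chain (PySem.Str.split₀ (PySem.Str.lower f)) := by
  unfold rank_alt
  have hfun : (fun (r : Int) (t : String) => min r (WORD_RANKS.getD t 5))
      = fun r t => min r (wcat t) := by
    funext r t; rw [wr_eq_wcat]
  rw [hfun, foldl_min_wcat _ 5 le_rfl]
  have := chain_bounds (PySem.Str.split₀ (PySem.Str.lower f))
  omega

lemma any_contains_comm (L M : List String) :
    (L.any fun c => M.contains c) = (M.any fun t => L.contains t) := by
  rcases h : L.any fun c => M.contains c with _ | _
  · symm
    simp only [List.any_eq_false, List.contains_iff_mem] at h ⊢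
    intro t ht hc
    exact h t hc ht
  · symm
    simp only [List.any_eq_true, List.contains_iff_mem] at h ⊢
    obtain ⟨c, hc, hm⟩ := h
    exact ⟨c, hm, hc⟩

lemma keyOf_eq_chain (f : String) :
    keyOf f = chain (PySem.Str.split₀ (PySem.Str.lower f)) := by
  unfold keyOf classify_feature rankCat chain
  have hfun : (fun c => (PySem.Set.ofList (PySem.Str.split₀ (PySem.Str.lower f))).contains c)
      = (fun c => (PySem.Str.split₀ (PySem.Str.lower f)).contains c) := by
    funext c
    rw [Bool.eq_iff_iff, PySem.Set.contains_iff, List.contains_iff_mem, PySem.Set.mem_ofList]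
  have hset : ∀ (L : List String),
      (L.any fun c => (PySem.Set.ofList (PySem.Str.split₀ (PySem.Str.lower f))).contains c)
        = ((PySem.Str.split₀ (PySem.Str.lower f)).any fun t => L.contains t) := by
    intro L
    rw [hfun, any_contains_comm]
  simp only [hset]
  split_ifs <;> simp_all

lemma rank_alt_eq_keyOf (f : String) : rank_alt f = keyOf f := by
  rw [rank_alt_eq_chain, keyOf_eq_chain]

-- blocks of equal key, in key order
def blocksOf (xs : List String) : List String :=
  ([0, 1, 2, 3, 4, 5] : List Int).flatMap (fun j => xs.filter (fun f => keyOf f == j))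

-- classify_feature only ever returns one of the six category names
lemma classify_cases (f : String) :
    classify_feature f = "color" ∨ classify_feature f = "pattern" ∨
    classify_feature f = "body" ∨ classify_feature f = "shape" ∨
    classify_feature f = "texture" ∨ classify_feature f = "other" := by
  simp only [classify_feature]
  split_ifs <;> simp

-- each bucket of A's dict after the loop is a filter of the input by category
lemma getD_buckets (xs : List String) (d0 : PySem.Dict String (List String)) (c : String)
    (h0 : d0.getD c [] = []) :
    (xs.foldl (fun d feat => d.modify (classify_feature feat) [] (· ++ [feat])) d0).getD c []
      = xs.filter (fun f => classify_feature f == c) := by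
  have hmap : xs.foldl (fun d feat => d.modify (classify_feature feat) [] (· ++ [feat])) d0
      = (xs.map (fun f => (classify_feature f, f))).foldl
          (fun d p => d.modify p.1 [] (· ++ [p.2])) d0 := by
    rw [List.foldl_map]
  rw [hmap, PySem.Dict.getD_foldl_modify_append, h0, List.filter_map]
  simp [Function.comp_def, List.map_map]

-- a category filter is the corresponding key filter
lemma classify_key (f : String) :
    ((classify_feature f == "color") = (keyOf f == 0)) ∧
    ((classify_feature f == "pattern") = (keyOf f == 1)) ∧
    ((classify_feature f == "body") = (keyOf f == 2)) ∧
    ((classify_feature f == "shape") = (keyOf f == 3)) ∧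
    ((classify_feature f == "texture") = (keyOf f == 4)) ∧
    ((classify_feature f == "other") = (keyOf f == 5)) := by
  rcases classify_cases f with h | h | h | h | h | h <;> simp [keyOf, rankCat, h]

-- A's "ordered" list equals the key blocks
lemma ordered_eq_blocks (xs : List String) :
    (["color", "pattern", "body", "shape", "texture", "other"] : List String).foldl
      (fun acc name =>
        ((xs.foldl (fun d feat => d.modify (classify_feature feat) [] (· ++ [feat]))
            ((((((PySem.Dict.empty.insert "color" []).insert "pattern" []).insert "body" []).insert
                "shape" []).insert "texture" []).insert "other" [])).getD name []).foldl
          (fun acc feat => acc ++ [feat]) acc) []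
      = blocksOf xs := by
  simp only [List.foldl_cons, List.foldl_nil, PySem.List.foldl_append_singleton]
  rw [getD_buckets xs _ "color" (by decide), getD_buckets xs _ "pattern" (by decide),
      getD_buckets xs _ "body" (by decide), getD_buckets xs _ "shape" (by decide),
      getD_buckets xs _ "texture" (by decide), getD_buckets xs _ "other" (by decide)]
  rw [List.filter_congr (fun x _ => (classify_key x).1),
      List.filter_congr (fun x _ => (classify_key x).2.1),
      List.filter_congr (fun x _ => (classify_key x).2.2.1),
      List.filter_congr (fun x _ => (classify_key x).2.2.2.1),
      List.filter_congr (fun x _ => (classify_key x).2.2.2.2.1),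
      List.filter_congr (fun x _ => (classify_key x).2.2.2.2.2)]
  simp [blocksOf, List.append_assoc]

-- B's six filter passes also produce the key blocks
lemma alt_out_eq_blocks (xs : List String) :
    (PySem.List.pyRange 0 6 1).foldl
        (fun out r => out ++ xs.filter (fun f => rank_alt f == r)) []
      = blocksOf xs := by
  have hr : PySem.List.pyRange 0 6 1 = ([0, 1, 2, 3, 4, 5] : List Int) := by decide
  rw [hr]
  simp only [List.foldl_cons, List.foldl_nil, List.nil_append]
  have hfix : ∀ (j : Int), xs.filter (fun f => rank_alt f == j)
      = xs.filter (fun f => keyOf f == j) := by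
    intro j
    apply List.filter_congr
    intro x _
    rw [rank_alt_eq_keyOf]
  simp only [hfix]
  simp [blocksOf, List.append_assoc]

-- ===== VERDICT (by name: the statement is the Claim_ definition above) =====
theorem select_diverse_features_spec : Claim_equal_select_diverse_features := by
  intro features max_features _
  unfold Spec_select_diverse_features select_diverse_features select_diverse_features_alt
  simp only []
  rw [ordered_eq_blocks features, alt_out_eq_blocks features]
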